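-- pv_equiv track=rewrite | github.com/xiaohe4966/esp32-wifi-sniffer | scripts/generate_wordlist.py | generate_pattern_passwords
-- ===== SOURCE A (Python) =====
-- def generate_pattern_passwords(pattern, min_len=8, max_len=16):
--     """基于模式生成密码"""
--     passwords = []
--
--     # 年份 + 模式
--     for year in range(2015, 2026):
--         passwords.append(f"{pattern}{year}")
--         passwords.append(f"{year}{pattern}")
--
--     # 模式 + 数字
--     for num in range(0, 1000):
--         pwd = f"{pattern}{num:03d}"
--         if min_len <= len(pwd) <= max_len:
--             passwords.append(pwd)
--
--     return passwords
-- ===== SOURCE B (Python) =====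
-- def generate_pattern_passwords(pattern, min_len=8, max_len=16):
--     """基于模式生成密码"""
--     # 年份 + 模式: build the year strings once, then interleave both affix forms
--     out = [p for ys in (str(y) for y in range(2015, 2026))
--              for p in (pattern + ys, ys + pattern)]
--     # 模式 + 数字: every candidate has the fixed length len(pattern)+3, so test once;
--     # the 3-digit suffixes are enumerated directly as digit triples in lexicographic
--     # order (identical to "%03d" % num for num = 0..999), no integer formatting.
--     if min_len <= len(pattern) + 3 <= max_len:
--         digits = "0123456789"
--         for d1 in digits:
--             for d2 in digits:
--                 for d3 in digits:
--                     out.append(pattern + d1 + d2 + d3)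
--     return out
-- ===== Notes on version B (the rewrite author's own statement) =====
-- stated objective: alternative
-- what changed: The number loop is replaced entirely: instead of formatting each of 0..999 with :03d and length-testing each candidate, B tests the constant candidate length len(pattern)+3 once and enumerates the three-digit suffixes directly as triples of decimal digit characters in lexicographic order (which coincides with %03d for 0..999); the year block becomes a comprehension over precomputed year strings.
import Mathlib
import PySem

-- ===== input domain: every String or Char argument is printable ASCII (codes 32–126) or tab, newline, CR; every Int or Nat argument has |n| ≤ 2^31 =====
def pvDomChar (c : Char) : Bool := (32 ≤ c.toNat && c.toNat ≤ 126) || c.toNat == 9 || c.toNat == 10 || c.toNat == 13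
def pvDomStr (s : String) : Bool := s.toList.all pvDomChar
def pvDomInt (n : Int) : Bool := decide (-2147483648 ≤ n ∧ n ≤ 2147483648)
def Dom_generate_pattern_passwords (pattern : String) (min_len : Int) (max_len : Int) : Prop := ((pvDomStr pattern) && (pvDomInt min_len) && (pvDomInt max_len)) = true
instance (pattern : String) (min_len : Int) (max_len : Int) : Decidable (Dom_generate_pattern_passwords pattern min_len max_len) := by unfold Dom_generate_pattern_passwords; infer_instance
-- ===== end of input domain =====

-- B replaces A's number loop: one test of the constant candidate length len(pattern)+3, then the
-- 3-digit suffixes enumerated directly as digit-character triples (lexicographic = %03d for 0..999).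

-- f"{num:03d}" for 0 ≤ num, exact as str(num).zfill(3) (zero left-pad to width 3)
def pvFmt03 (num : Int) : String := PySem.Str.zfill (PySem.Int.toStr num) 3

-- ===== PORT A =====
def generate_pattern_passwords (pattern : String) (min_len : Int) (max_len : Int) : List String :=
  -- 年份 + 模式
  let passwords := (PySem.List.pyRange 2015 2026 1).foldl
    (fun acc year => (acc ++ [pattern ++ PySem.Int.toStr year]) ++ [PySem.Int.toStr year ++ pattern]) []
  -- 模式 + 数字
  (PySem.List.pyRange 0 1000 1).foldl
    (fun acc num =>
      let pwd := pattern ++ pvFmt03 num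
      if min_len ≤ PySem.Str.len pwd ∧ PySem.Str.len pwd ≤ max_len then acc ++ [pwd] else acc)
    passwords

-- ===== PORT B =====
-- iterating a Python str yields its 1-character strings: Char.toString is exact for that
def generate_pattern_passwords_alt (pattern : String) (min_len : Int) (max_len : Int) : List String :=
  let out := ((PySem.List.pyRange 2015 2026 1).map PySem.Int.toStr).flatMap
    (fun ys => [pattern ++ ys, ys ++ pattern])
  if min_len ≤ PySem.Str.len pattern + 3 ∧ PySem.Str.len pattern + 3 ≤ max_len then
    ("0123456789").toList.foldl (fun acc c1 =>
      ("0123456789").toList.foldl (fun acc c2 =>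
        ("0123456789").toList.foldl (fun acc c3 =>
          acc ++ [pattern ++ c1.toString ++ c2.toString ++ c3.toString]) acc) acc) out
  else out

-- ===== PRECONDITION & SPEC =====
def Spec_generate_pattern_passwords (pattern : String) (min_len : Int) (max_len : Int) (out : List String) : Prop := out = generate_pattern_passwords_alt pattern min_len max_len
instance (pattern : String) (min_len : Int) (max_len : Int) (out : List String) : Decidable (Spec_generate_pattern_passwords pattern min_len max_len out) := by unfold Spec_generate_pattern_passwords; infer_instance

-- ===== CLAIM =====
def Claim_equal_generate_pattern_passwords : Prop := ∀ (pattern : String) (min_len : Int) (max_len : Int), Dom_generate_pattern_passwords pattern min_len max_len → Spec_generate_pattern_passwords pattern min_len max_len (generate_pattern_passwords pattern min_len max_len)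

-- ===== LEMMAS AND PROOFS =====

-- the digit-triple enumeration yields exactly the zero-padded char lists of 0..999, in order
set_option maxRecDepth 100000 in
lemma triples_eq_fmt03 :
    ("0123456789").toList.flatMap (fun c1 =>
      ("0123456789").toList.flatMap (fun c2 =>
        ("0123456789").toList.map (fun c3 => ([c1,c2,c3] : List Char))))
    = (PySem.List.pyRange 0 1000 1).map (fun n => PySem.Chars.zfill (PySem.Int.toChars n) 3) := by
  rfl

-- glue: the four-way string concatenation of B is pattern ++ the char-list suffix
lemma cat3 (pattern : String) (c1 c2 c3 : Char) :
    pattern ++ c1.toString ++ c2.toString ++ c3.toString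
      = pattern ++ String.ofList [c1, c2, c3] := by
  apply String.toList_inj.mp
  simp

lemma fmt03_toList (n : Int) :
    (pvFmt03 n).toList = PySem.Chars.zfill (PySem.Int.toChars n) 3 := by
  simp [pvFmt03, PySem.Str.toList_zfill]

lemma fmt03_eq_ofList (pattern : String) (n : Int) :
    pattern ++ pvFmt03 n = pattern ++ String.ofList (PySem.Chars.zfill (PySem.Int.toChars n) 3) := by
  apply String.toList_inj.mp
  simp [fmt03_toList]

-- every zero-padded suffix of 0..999 has exactly 3 characters (read off triples_eq_fmt03)
lemma len_fmt03 (num : Int) (h : num ∈ PySem.List.pyRange 0 1000 1) :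
    (pvFmt03 num).toList.length = 3 := by
  rw [fmt03_toList]
  have hmem : PySem.Chars.zfill (PySem.Int.toChars num) 3
      ∈ (PySem.List.pyRange 0 1000 1).map (fun n => PySem.Chars.zfill (PySem.Int.toChars n) 3) :=
    List.mem_map_of_mem h
  rw [← triples_eq_fmt03] at hmem
  simp only [List.mem_flatMap, List.mem_map] at hmem
  obtain ⟨c1, -, c2, -, c3, -, hEq⟩ := hmem
  rw [← hEq]
  rfl

-- ===== VERDICT =====
set_option maxRecDepth 4096 in
set_option maxHeartbeats 1000000 in
theorem generate_pattern_passwords_spec : Claim_equal_generate_pattern_passwords := by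
  intro pattern min_len max_len _
  simp only [Spec_generate_pattern_passwords, generate_pattern_passwords,
    generate_pattern_passwords_alt]
  -- A's year loop: appending two singletons = extending by a two-element list = B's flatMap
  have h1 := PySem.List.foldl_congr_mem
      (l := PySem.List.pyRange 2015 2026 1) (init := ([] : List String))
      (f := fun acc year =>
        (acc ++ [pattern ++ PySem.Int.toStr year]) ++ [PySem.Int.toStr year ++ pattern])
      (g := fun acc year => acc ++ [pattern ++ PySem.Int.toStr year, PySem.Int.toStr year ++ pattern])
      (by intro acc year _; simp)
  rw [h1, PySem.List.foldl_append_eq_flatMap, List.nil_append, List.flatMap_map]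
  -- every number candidate of A has length len(pattern) + 3
  have hlen : ∀ num ∈ PySem.List.pyRange 0 1000 1,
      PySem.Str.len (pattern ++ pvFmt03 num) = PySem.Str.len pattern + 3 := by
    intro num hnum
    have h3 := len_fmt03 num hnum
    simp [PySem.Str.len_eq, h3]
  -- so A's filter is loop-invariant
  have h2 := PySem.List.foldl_congr_mem
      (l := PySem.List.pyRange 0 1000 1)
      (init := (PySem.List.pyRange 2015 2026 1).flatMap
        (fun year => [pattern ++ PySem.Int.toStr year, PySem.Int.toStr year ++ pattern]))
      (f := fun acc num =>
        if min_len ≤ PySem.Str.len (pattern ++ pvFmt03 num) ∧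
            PySem.Str.len (pattern ++ pvFmt03 num) ≤ max_len
        then acc ++ [pattern ++ pvFmt03 num] else acc)
      (g := fun acc num =>
        if min_len ≤ PySem.Str.len pattern + 3 ∧ PySem.Str.len pattern + 3 ≤ max_len
        then acc ++ [pattern ++ pvFmt03 num] else acc)
      (by intro acc num hnum; simp only [hlen num hnum])
  rw [h2]
  by_cases hC : min_len ≤ PySem.Str.len pattern + 3 ∧ PySem.Str.len pattern + 3 ≤ max_len
  · -- B's nested digit folds flatten to one flatMap of suffix strings
    simp only [hC, and_self, if_true, PySem.List.foldl_append_singleton_eq_map,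
      PySem.List.foldl_append_eq_flatMap]
    have hsuffix : (PySem.List.pyRange 0 1000 1).map (fun num => pattern ++ pvFmt03 num)
        = ("0123456789").toList.flatMap (fun c1 =>
            ("0123456789").toList.flatMap (fun c2 =>
              ("0123456789").toList.map (fun c3 =>
                pattern ++ c1.toString ++ c2.toString ++ c3.toString))) := by
      simp only [fmt03_eq_ofList, cat3]
      have hcomp : (fun n => pattern ++ String.ofList (PySem.Chars.zfill (PySem.Int.toChars n) 3))
          = (fun l => pattern ++ String.ofList l) ∘ (fun n => PySem.Chars.zfill (PySem.Int.toChars n) 3) := rfl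
      rw [hcomp, ← List.map_map, ← triples_eq_fmt03]
      simp
    rw [hsuffix]
  · simp only [hC, if_false, PySem.List.foldl_ignore]
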